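-- pv_equiv track=rewrite | github.com/guyyugon/1kurs | string.py | words
-- ===== SOURCE A (Python) =====
-- def words(s,q,word):# s -- строка, в которой выделяем слова, q -- набор разделителей, возвращает первое самое длинное слово в строке s согласно набору разделителй среди слов, длинне чем word
-- 	stat=0   #в этой переменной сохраняется длина текущего слова
-- 	i=0  #тндекс символа в строке
-- 	while(True):# /цикл для перебора всех символов строки
-- 		if(s[i] in q):# если очередной символ строки является разделителем
-- 			if(stat>len(word)):#если s[i] -- это первый разделитель после слова, сравниваем длину предыдущего слова (длина которого накоплена в stat) с длиной слова, хранящегося в word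
-- 				word=s[i-stat:i]#если выделенное слово имеет длину, ольшую, чем word, вырезаем его из s и заменяем word на это слово
-- 			stat=0 # дляследующего слова
-- 		else:
-- 			stat+=1  # если находимся внутри слова (текущий символ не является разделителем), увеличиваем длину
-- 		i+=1 #переходим к следующему имволу строки s
-- 		if(i==len(s)): #если символ s[i-1] был последним в строке s
-- 			if stat>len(word): #если последнее слово имее длину, большую, чем wosd
-- 				word=s[i-stat:i]
-- 			break#//выходим из цикла
-- 	return word
-- ===== SOURCE B (Python) =====
-- def words(s, q, word):
--     # two-pass: materialize the runs between delimiters, then keep the first strictly-longer word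
--     parts = []
--     cur = []
--     for ch in s:
--         if ch in q:
--             parts.append(''.join(cur))
--             cur = []
--         else:
--             cur.append(ch)
--     parts.append(''.join(cur))
--     best = word
--     for w in parts:
--         if len(w) > len(best):
--             best = w
--     return best
-- ===== Notes on version B (the rewrite author's own statement) =====
-- stated objective: alternative
-- what changed: Replaced A's fused single-scan with index arithmetic and in-loop slicing by a two-pass materialize-then-reduce: first split s into the runs between delimiter characters, then fold over that word list keeping the first strictly longer word.
import Mathlib
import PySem

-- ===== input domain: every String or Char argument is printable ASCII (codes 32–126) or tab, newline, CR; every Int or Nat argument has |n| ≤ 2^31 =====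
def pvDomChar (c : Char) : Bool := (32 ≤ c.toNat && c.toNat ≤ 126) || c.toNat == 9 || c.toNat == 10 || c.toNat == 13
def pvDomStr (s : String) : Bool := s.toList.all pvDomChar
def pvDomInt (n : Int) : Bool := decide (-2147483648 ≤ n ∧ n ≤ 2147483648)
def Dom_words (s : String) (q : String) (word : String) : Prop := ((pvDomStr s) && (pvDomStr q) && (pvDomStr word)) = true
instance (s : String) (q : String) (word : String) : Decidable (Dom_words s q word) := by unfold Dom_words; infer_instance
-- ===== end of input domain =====

-- B replaces A's fused single scan (index arithmetic + in-loop slicing) by a two-pass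
-- materialize-the-runs-then-reduce structure; equal return values on nonempty s (A raises on s = "").

-- ===== PORT A =====
-- A's while-True loop: state (i, stat, word); s[i] is a 1-char string, so 'in q' is char membership;
-- the slice s[i-stat:i] is exact here since 0 ≤ i-stat ≤ i ≤ len(s).
def wordsLoop (cs : List Char) (qs : List Char) (i : Nat) (stat : Nat) (word : List Char) : List Char :=
  if h : i < cs.length then
    let p := if cs[i] ∈ qs then
        ((if stat > word.length then PySem.List.slice cs (some ((i : Int) - (stat : Int))) (some (i : Int)) else word), 0)
      else (word, stat + 1)
    let i' := i + 1
    if i' = cs.length then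
      if p.2 > p.1.length then PySem.List.slice cs (some ((i' : Int) - (p.2 : Int))) (some (i' : Int)) else p.1
    else wordsLoop cs qs i' p.2 p.1
  else word  -- unreachable when called with i < len(s); s = "" raises in Python and is outside Pre_
termination_by cs.length - i

def words (s : String) (q : String) (word : String) : String :=
  String.ofList (wordsLoop s.toList q.toList 0 0 word.toList)

-- ===== PORT B =====
-- Source B pass 1: fold over s building (parts, cur); pass 2: fold over parts ++ [cur] keeping the best.
def words_alt (s : String) (q : String) (word : String) : String :=
  let st := s.toList.foldl
    (fun (st : List (List Char) × List Char) ch =>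
      if ch ∈ q.toList then (st.1 ++ [st.2], []) else (st.1, st.2 ++ [ch]))
    ([], [])
  let parts := st.1 ++ [st.2]
  String.ofList (parts.foldl (fun b w => if w.length > b.length then w else b) word.toList)

-- ===== PRECONDITION & SPEC =====
-- A evaluates s[0] before any length check, so it raises IndexError on empty s; Pre_ excludes exactly that.
def Pre_words (s : String) (q : String) (word : String) : Prop := s ≠ ""
instance (s : String) (q : String) (word : String) : Decidable (Pre_words s q word) := by unfold Pre_words; infer_instance
def pvWitness_words : String × String × String := ("ab cde f", " ", "xy")

def Spec_words (s : String) (q : String) (word : String) (out : String) : Prop := out = words_alt s q word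
instance (s : String) (q : String) (word : String) (out : String) : Decidable (Spec_words s q word out) := by unfold Spec_words; infer_instance

-- ===== CLAIM (what is proved, stated in full; the proofs are below) =====
def Claim_equal_words : Prop := ∀ (s : String) (q : String) (word : String), Dom_words s q word → Pre_words s q word → Spec_words s q word (words s q word)

-- ===== LEMMAS AND PROOFS =====

-- the common reference recursion: g runs over the remaining characters with the current run r
def wordsRef (qs : List Char) (r : List Char) (word : List Char) : List Char → List Char
  | [] => if r.length > word.length then r else word
  | c :: rest =>
      if c ∈ qs then
        wordsRef qs [] (if r.length > word.length then r else word) rest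
      else
        wordsRef qs (r ++ [c]) word rest

-- B's pass-1 fold only appends to the parts component
theorem foldl_split_parts (qs : List Char) (rest : List Char) (parts : List (List Char)) (cur : List Char) :
    rest.foldl (fun (st : List (List Char) × List Char) ch =>
        if ch ∈ qs then (st.1 ++ [st.2], []) else (st.1, st.2 ++ [ch])) (parts, cur)
    = (parts ++ (rest.foldl (fun (st : List (List Char) × List Char) ch =>
        if ch ∈ qs then (st.1 ++ [st.2], []) else (st.1, st.2 ++ [ch])) ([], cur)).1,
       (rest.foldl (fun (st : List (List Char) × List Char) ch =>
        if ch ∈ qs then (st.1 ++ [st.2], []) else (st.1, st.2 ++ [ch])) ([], cur)).2) := by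
  induction rest generalizing parts cur with
  | nil => simp
  | cons c rest ih =>
      by_cases hc : c ∈ qs
      · simp only [List.foldl_cons, if_pos hc, List.nil_append]
        rw [ih (parts ++ [cur]) [], ih [cur] []]
        simp
      · simp only [List.foldl_cons, if_neg hc]
        exact ih parts (cur ++ [c])

-- B's two passes compute wordsRef
theorem alt_eq_ref (qs : List Char) (rest cur w : List Char) :
    (let st := rest.foldl (fun (st : List (List Char) × List Char) ch =>
        if ch ∈ qs then (st.1 ++ [st.2], []) else (st.1, st.2 ++ [ch])) ([], cur)
     (st.1 ++ [st.2]).foldl (fun b w => if w.length > b.length then w else b) w)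
    = wordsRef qs cur w rest := by
  induction rest generalizing cur w with
  | nil => simp [wordsRef]
  | cons c rest ih =>
      by_cases hc : c ∈ qs
      · simp only [List.foldl_cons, if_pos hc, List.nil_append, wordsRef]
        rw [foldl_split_parts qs rest [cur] []]
        rw [List.append_assoc, List.singleton_append, List.foldl_cons]
        exact ih [] (if cur.length > w.length then cur else w)
      · simp only [List.foldl_cons, if_neg hc, wordsRef]
        exact ih (cur ++ [c]) w

-- the slice s[i-stat:i] is the current run, extended one char at a time
theorem slice_run (cs : List Char) (i stat : Nat) (hs : stat ≤ i) :
    PySem.List.slice cs (some ((i : Int) - (stat : Int))) (some (i : Int))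
    = (cs.drop (i - stat)).take stat := by
  have : (i : Int) - (stat : Int) = ((i - stat : Nat) : Int) := by omega
  rw [this, PySem.List.slice_natCast]
  have h2 : i - (i - stat) = stat := by omega
  rw [h2]

-- A's loop computes wordsRef
theorem loop_eq_ref (cs qs : List Char) :
    ∀ (n i stat : Nat) (word : List Char), i < cs.length → n = cs.length - i → stat ≤ i →
    wordsLoop cs qs i stat word
      = wordsRef qs ((cs.drop (i - stat)).take stat) word (cs.drop i) := by
  intro n
  induction n with
  | zero => intro i stat word hi hn; omega
  | succ n ih =>
      intro i stat word hi hn hs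
      rw [wordsLoop, dif_pos hi]
      have hdrop : cs.drop i = cs[i] :: cs.drop (i + 1) := List.drop_eq_getElem_cons hi
      have hrl : ((cs.drop (i - stat)).take stat).length = stat := by
        simp only [List.length_take, List.length_drop]
        omega
      have hext : (cs.drop (i - stat)).take (stat + 1) = (cs.drop (i - stat)).take stat ++ [cs[i]] := by
        have h2 : stat < (cs.drop (i - stat)).length := by
          simp only [List.length_drop]; omega
        have h3 : i - stat + stat = i := by omega
        rw [List.take_add_one, List.getElem?_eq_getElem h2]
        simp only [Option.toList_some, List.getElem_drop, h3]
      have hshift : i + 1 - (stat + 1) = i - stat := by omega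
      by_cases hc : cs[i] ∈ qs
      · simp only [if_pos hc]
        by_cases hend : i + 1 = cs.length
        · simp only [if_pos hend]
          have h0 : cs.drop (i + 1) = [] := by rw [List.drop_eq_nil_iff]; omega
          rw [hdrop, wordsRef, if_pos hc, h0, wordsRef]
          rw [slice_run cs i stat hs, hrl]
          simp
        · simp only [if_neg hend]
          rw [ih (i + 1) 0 _ (by omega) (by omega) (by omega)]
          rw [hdrop, wordsRef, if_pos hc]
          rw [slice_run cs i stat hs, hrl]
          simp
      · simp only [if_neg hc]
        by_cases hend : i + 1 = cs.length
        · simp only [if_pos hend]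
          have h0 : cs.drop (i + 1) = [] := by rw [List.drop_eq_nil_iff]; omega
          rw [hdrop, wordsRef, if_neg hc, h0, wordsRef]
          rw [slice_run cs (i + 1) (stat + 1) (by omega), hshift, hext]
          rw [List.length_append, hrl]
          simp
        · simp only [if_neg hend]
          rw [ih (i + 1) (stat + 1) _ (by omega) (by omega) (by omega)]
          rw [hdrop, wordsRef, if_neg hc, hshift, hext]

-- ===== VERDICT (by name: the statement is the Claim_ definition above) =====
theorem words_spec : Claim_equal_words := by
  intro s q word _ hpre
  unfold Spec_words words words_alt
  have hne : s.toList ≠ [] := by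
    intro h
    apply hpre
    have := congrArg String.ofList h
    simpa using this
  have hlen : 0 < s.toList.length := List.length_pos_iff.mpr hne
  rw [loop_eq_ref s.toList q.toList (s.toList.length - 0) 0 0 word.toList hlen rfl (le_refl 0)]
  simp only [Nat.sub_zero, List.drop_zero, List.take_zero]
  rw [← alt_eq_ref q.toList s.toList [] word.toList]
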